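-- pv_equiv track=rewrite | github.com/melug/Algorithms | WarmUp/lucky_purchase.py | is_lucky
-- ===== SOURCE A (Python) =====
-- def is_lucky(laptop):
--     brand, price = laptop
--     fours, sevens = 0, 0
--     for c in price:
--         if c=='4':
--             fours += 1
--         elif c=='7':
--             sevens += 1
--         else:
--             return False
--     return fours==sevens
-- ===== SOURCE B (Python) =====
-- def is_lucky(laptop):
--     brand, price = laptop
--     half, odd = divmod(len(price), 2)
--     return odd == 0 and sorted(price) == ['4'] * half + ['7'] * half
-- ===== Notes on version B (the rewrite author's own statement) =====
-- stated objective: alternative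
-- what changed: Replaced A's short-circuiting classify-and-count loop by a canonical-form check: the price is lucky iff its length is even and sorting its characters yields the unique canonical lucky string '4'*half + '7'*half, so no per-character classification or counter comparison is performed.
import Mathlib
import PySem

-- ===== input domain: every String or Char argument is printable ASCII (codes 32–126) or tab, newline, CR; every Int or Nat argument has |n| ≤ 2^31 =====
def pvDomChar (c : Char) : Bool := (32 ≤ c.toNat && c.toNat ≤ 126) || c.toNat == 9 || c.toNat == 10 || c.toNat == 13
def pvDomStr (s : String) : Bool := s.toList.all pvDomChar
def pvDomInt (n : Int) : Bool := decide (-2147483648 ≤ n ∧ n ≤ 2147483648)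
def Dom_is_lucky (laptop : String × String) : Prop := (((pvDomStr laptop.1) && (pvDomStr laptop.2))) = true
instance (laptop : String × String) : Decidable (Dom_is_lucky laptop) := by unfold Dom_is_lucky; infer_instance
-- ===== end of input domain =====

-- B replaces A's classify-and-count loop by a canonical-form check: the price is lucky iff
-- its length is even and its sorted characters equal '4'*half ++ '7'*half; alternative algorithm, similar cost.

-- ===== PORT A =====
-- the loop 'for c in price: if c=='4': fours+=1 elif c=='7': sevens+=1 else: return False',
-- then 'return fours==sevens' (the early 'return False' becomes the third branch)
def luckyLoop : List Char → Nat → Nat → Bool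
  | [], fours, sevens => fours == sevens
  | c :: rest, fours, sevens =>
    if c == '4' then luckyLoop rest (fours + 1) sevens
    else if c == '7' then luckyLoop rest fours (sevens + 1)
    else false

def is_lucky (laptop : String × String) : Bool :=
  -- brand, price = laptop  (brand is unused by A)
  let price := laptop.2
  luckyLoop price.toList 0 0

-- ===== PORT B =====
def is_lucky_alt (laptop : String × String) : Bool :=
  -- brand, price = laptop  (brand is unused by B)
  let price := laptop.2
  -- half, odd = divmod(len(price), 2)   (len(price) is a non-negative count)
  let half := price.toList.length / 2
  let odd := price.toList.length % 2
  -- odd == 0 and sorted(price) == ['4'] * half + ['7'] * half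
  (odd == 0) &&
    (PySem.List.sorted price.toList (fun x => x) false ==
      List.replicate half '4' ++ List.replicate half '7')

-- ===== PRECONDITION & SPEC =====
def Spec_is_lucky (laptop : String × String) (out : Bool) : Prop := out = is_lucky_alt laptop
instance (laptop : String × String) (out : Bool) : Decidable (Spec_is_lucky laptop out) := by unfold Spec_is_lucky; infer_instance

-- ===== CLAIM (what is proved, stated in full; the proofs are below) =====
def Claim_equal_is_lucky : Prop := ∀ (laptop : String × String), Dom_is_lucky laptop → Spec_is_lucky laptop (is_lucky laptop)

-- ===== LEMMAS AND PROOFS =====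

-- characterisation of A's loop: all characters lucky ⇒ compare counters + remaining counts
theorem luckyLoop_eq : ∀ (l : List Char) (fours sevens : Nat),
    luckyLoop l fours sevens =
      if ∀ c ∈ l, c = '4' ∨ c = '7'
      then (fours + l.count '4' == sevens + l.count '7')
      else false := by
  intro l; induction l with
  | nil => simp [luckyLoop]
  | cons a t ih =>
    intro fours sevens
    by_cases h4 : a = '4'
    · subst h4; simp [luckyLoop, ih]
      have h : fours + 1 + List.count '4' t = fours + (List.count '4' t + 1) := by omega
      rw [h]
    · by_cases h7 : a = '7'
      · subst h7; simp [luckyLoop, ih, h4]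
        have h : sevens + 1 + List.count '7' t = sevens + (List.count '7' t + 1) := by omega
        rw [h]
      · simp [luckyLoop, h4, h7]

-- the canonical lucky list
theorem count_canon (k : Nat) (c : Char) :
    (List.replicate k '4' ++ List.replicate k '7').count c =
      if c = '4' ∨ c = '7' then k else 0 := by
  by_cases h4 : c = '4'
  · subst h4; simp [List.count_replicate]
  · by_cases h7 : c = '7'
    · subst h7; simp [List.count_replicate]
    · simp [List.count_replicate, h4, h7, Ne.symm h4, Ne.symm h7]

theorem canon_pairwise (k : Nat) :
    (List.replicate k '4' ++ List.replicate k '7').Pairwise (· ≤ ·) := by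
  refine List.pairwise_append.2 ⟨List.pairwise_replicate.2 (Or.inr le_rfl),
    List.pairwise_replicate.2 (Or.inr le_rfl), ?_⟩
  intro a ha b hb
  rw [List.eq_of_mem_replicate ha, List.eq_of_mem_replicate hb]
  decide

-- length = count '4' + count '7' when every character is lucky
theorem length_eq_counts : ∀ (l : List Char), (∀ c ∈ l, c = '4' ∨ c = '7') →
    l.length = l.count '4' + l.count '7' := by
  intro l; induction l with
  | nil => simp
  | cons a t ih =>
    intro h
    have ht := ih (fun c hc => h c (List.mem_cons_of_mem _ hc))
    rcases h a List.mem_cons_self with h4 | h7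
    · subst h4; simp [ht]; omega
    · subst h7; simp [ht]; omega

-- core equivalence on the character list
theorem lucky_canon (l : List Char) :
    luckyLoop l 0 0 = ((l.length % 2 == 0) &&
      (PySem.List.sorted l (fun x => x) false ==
        List.replicate (l.length / 2) '4' ++ List.replicate (l.length / 2) '7')) := by
  rw [luckyLoop_eq]
  by_cases hall : ∀ c ∈ l, c = '4' ∨ c = '7'
  · rw [if_pos hall]
    have hlen := length_eq_counts l hall
    by_cases hc : l.count '4' = l.count '7'
    · -- counts equal: both sides true
      have heven : l.length % 2 = 0 := by omega
      have hhalf : l.length / 2 = l.count '4' := by omega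
      have hperm : (List.replicate (l.length / 2) '4' ++ List.replicate (l.length / 2) '7').Perm l := by
        rw [List.perm_iff_count]
        intro c
        rw [count_canon]
        by_cases hc4 : c = '4' ∨ c = '7'
        · rw [if_pos hc4, hhalf]
          rcases hc4 with h | h <;> subst h
          · rfl
          · omega
        · rw [if_neg hc4]
          symm; rw [List.count_eq_zero]
          intro hmem; exact hc4 (hall c hmem)
      rw [PySem.List.sorted_id_eq_of_perm_of_pairwise _ _ hperm (canon_pairwise _)]
      simp [heven, hc]
    · -- counts differ: both sides false
      have : ¬ (PySem.List.sorted l (fun x => x) false =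
          List.replicate (l.length / 2) '4' ++ List.replicate (l.length / 2) '7') := by
        intro hEq
        have hperm : l.Perm (List.replicate (l.length / 2) '4' ++ List.replicate (l.length / 2) '7') := by
          have := PySem.List.sorted_perm (xs := l) (key := fun x => x) (rev := false)
          rw [hEq] at this
          exact this.symm
        have h4 := hperm.count_eq '4'
        have h7 := hperm.count_eq '7'
        rw [count_canon] at h4 h7
        simp at h4 h7
        omega
      have hb : ((PySem.List.sorted l (fun x => x) false ==
          List.replicate (l.length / 2) '4' ++ List.replicate (l.length / 2) '7') : Bool) = false :=
        beq_eq_false_iff_ne.2 this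
      rw [hb]
      simp [hc]
  · -- some character is not lucky: both sides false
    rw [if_neg hall]
    rw [not_forall] at hall
    simp only [not_forall, not_or, exists_prop] at hall
    obtain ⟨c, hmem, hc⟩ := hall
    have : ¬ (PySem.List.sorted l (fun x => x) false =
        List.replicate (l.length / 2) '4' ++ List.replicate (l.length / 2) '7') := by
      intro hEq
      have hmem' : c ∈ PySem.List.sorted l (fun x => x) false :=
        (PySem.List.mem_sorted _ _ _ _).2 hmem
      rw [hEq] at hmem'
      rcases List.mem_append.1 hmem' with h | h
      · exact hc.1 (List.eq_of_mem_replicate h)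
      · exact hc.2 (List.eq_of_mem_replicate h)
    have hb : ((PySem.List.sorted l (fun x => x) false ==
        List.replicate (l.length / 2) '4' ++ List.replicate (l.length / 2) '7') : Bool) = false :=
      beq_eq_false_iff_ne.2 this
    rw [hb]
    simp

-- ===== VERDICT (by name: the statement is the Claim_ definition above) =====
theorem is_lucky_spec : Claim_equal_is_lucky := by
  intro laptop _
  unfold Spec_is_lucky is_lucky is_lucky_alt
  exact lucky_canon laptop.2.toList
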